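-- pv_equiv track=rewrite | github.com/menudoproblema/mongoeco | src/mongoeco/engines/_sqlite_search_runtime.py | _storage_keys_with_minimum_frequency
-- ===== SOURCE A (Python) =====
-- def _union_storage_key_lists(lists: list[list[str]]) -> list[str]:
--     seen: set[str] = set()
--     ordered: list[str] = []
--     for values in lists:
--         for storage_key in values:
--             if storage_key in seen:
--                 continue
--             seen.add(storage_key)
--             ordered.append(storage_key)
--     return ordered
--
-- def _storage_keys_with_minimum_frequency(
--     lists: list[list[str]],
--     minimum: int,
-- ) -> list[str]:
--     if minimum <= 1:
--         return _union_storage_key_lists(lists)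
--     counts: dict[str, int] = {}
--     order: dict[str, int] = {}
--     for values in lists:
--         for storage_key in values:
--             counts[storage_key] = counts.get(storage_key, 0) + 1
--             order.setdefault(storage_key, len(order))
--     return [
--         storage_key
--         for storage_key, count in sorted(counts.items(), key=lambda item: order[item[0]])
--         if count >= minimum
--     ]
-- ===== SOURCE B (Python) =====
-- def _storage_keys_with_minimum_frequency(
--     lists: list[list[str]],
--     minimum: int,
-- ) -> list[str]:
--     flat = [key for values in lists for key in values]
--     counts: dict[str, int] = {}
--     for key in flat:
--         counts[key] = counts.get(key, 0) + 1
--     return [key for key in dict.fromkeys(flat) if counts[key] >= minimum]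
-- ===== Notes on version B (the rewrite author's own statement) =====
-- stated objective: simpler
-- what changed: B flattens once, counts occurrences in a single pass over the flat list, deduplicates via dict.fromkeys for the first-seen order and filters by count, dropping A's separate order dict, its sort by order index and its special minimum<=1 branch.
import Mathlib
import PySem

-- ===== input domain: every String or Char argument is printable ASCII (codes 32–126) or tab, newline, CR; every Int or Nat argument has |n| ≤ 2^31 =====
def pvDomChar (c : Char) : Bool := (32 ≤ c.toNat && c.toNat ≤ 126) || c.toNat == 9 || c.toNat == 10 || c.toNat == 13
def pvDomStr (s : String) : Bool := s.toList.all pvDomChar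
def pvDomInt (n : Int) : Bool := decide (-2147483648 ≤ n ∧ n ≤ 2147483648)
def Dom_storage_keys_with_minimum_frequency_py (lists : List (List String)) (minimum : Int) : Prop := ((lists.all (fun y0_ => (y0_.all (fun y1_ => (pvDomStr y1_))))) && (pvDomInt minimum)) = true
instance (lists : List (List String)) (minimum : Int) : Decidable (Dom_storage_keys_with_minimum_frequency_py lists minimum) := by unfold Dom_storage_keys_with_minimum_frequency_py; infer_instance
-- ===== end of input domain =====

-- B flattens once, counts in a single pass, deduplicates for the first-seen order and filters
-- by count, dropping A's order dict, its sort by order index and its minimum<=1 branch.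

-- ===== PORT A =====
-- _union_storage_key_lists: nested loop keeping (seen : set, ordered : list)
def union_storage_key_lists_py (lists : List (List String)) : List String :=
  (lists.foldl (fun (st : PySem.Set String × List String) values =>
      values.foldl (fun st storage_key =>
        if PySem.Set.contains st.1 storage_key then st
        else (PySem.Set.add st.1 storage_key, st.2 ++ [storage_key])) st)
    (PySem.Set.empty, [])).2

def storage_keys_with_minimum_frequency_py (lists : List (List String)) (minimum : Int) : List String :=
  if minimum ≤ 1 then union_storage_key_lists_py lists
  else
    let st := lists.foldl (fun (st : PySem.Dict String Int × PySem.Dict String Int) values =>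
      values.foldl (fun st storage_key =>
        (st.1.insert storage_key (st.1.getD storage_key 0 + 1),
         st.2.setdefault storage_key (st.2.size : Int))) st)
      (PySem.Dict.empty, PySem.Dict.empty)
    -- order[item[0]] never raises in A (counts' keys ⊆ order's keys), so getD _ 0 is exact here
    ((PySem.List.sorted st.1.items (fun item => st.2.getD item.1 0)).filter
       (fun item => decide (minimum ≤ item.2))).map (fun item => item.1)

-- ===== PORT B =====
def storage_keys_with_minimum_frequency_py_alt (lists : List (List String)) (minimum : Int) : List String :=
  let flat := lists.flatten
  let counts := flat.foldl (fun (d : PySem.Dict String Int) key => d.insert key (d.getD key 0 + 1))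
    PySem.Dict.empty
  (PySem.List.dedup flat).filter (fun key => decide (minimum ≤ counts.getD key 0))

-- ===== PRECONDITION & SPEC =====
def Spec_storage_keys_with_minimum_frequency_py (lists : List (List String)) (minimum : Int) (out : List String) : Prop := out = storage_keys_with_minimum_frequency_py_alt lists minimum
instance (lists : List (List String)) (minimum : Int) (out : List String) : Decidable (Spec_storage_keys_with_minimum_frequency_py lists minimum out) := by unfold Spec_storage_keys_with_minimum_frequency_py; infer_instance

-- ===== CLAIM (what is proved, stated in full; the proofs are below) =====
def Claim_equal_storage_keys_with_minimum_frequency_py : Prop := ∀ (lists : List (List String)) (minimum : Int), Dom_storage_keys_with_minimum_frequency_py lists minimum → Spec_storage_keys_with_minimum_frequency_py lists minimum (storage_keys_with_minimum_frequency_py lists minimum)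

-- ===== LEMMAS AND PROOFS =====

-- the union loop keeps seen = ordered; both end up as Set.update of the flattened input
lemma unionPair (l : List String) (s : List String) :
    l.foldl (fun (st : PySem.Set String × List String) storage_key =>
        if PySem.Set.contains st.1 storage_key then st
        else (PySem.Set.add st.1 storage_key, st.2 ++ [storage_key])) (s, s)
      = (PySem.Set.update s l, PySem.Set.update s l) := by
  induction l generalizing s with
  | nil => simp [PySem.Set.update]
  | cons x l ih =>
    have hstep : (if PySem.Set.contains ((s, s) : PySem.Set String × List String).1 x
        then ((s, s) : PySem.Set String × List String)
        else (PySem.Set.add (s, s).1 x, (s, s).2 ++ [x]))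
        = ((PySem.Set.add s x, PySem.Set.add s x) : PySem.Set String × List String) := by
      by_cases h : PySem.Set.contains s x = true <;> simp_all [PySem.Set.add]
    rw [List.foldl_cons, hstep]
    simpa [PySem.Set.update] using ih (PySem.Set.add s x)

lemma union_eq_dedup (lists : List (List String)) :
    union_storage_key_lists_py lists = PySem.List.dedup lists.flatten := by
  unfold union_storage_key_lists_py
  rw [← List.foldl_flatten,
    show (PySem.Set.empty : PySem.Set String) = ([] : List String) from rfl,
    unionPair lists.flatten []]
  simp [PySem.Set.update_nil_left]

def withIdx (s : List String) : List (String × Int) :=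
  s.zipIdx.map (fun p => (p.1, (p.2 : Int)))

-- A's order dict, after folding l starting from a dict indexing s, indexes Set.update s l
lemma orderFold_items (l : List String) (s : List String) (hs : s.Nodup) :
    (l.foldl (fun (d : PySem.Dict String Int) storage_key =>
        d.setdefault storage_key (d.size : Int)) (PySem.Dict.mk (withIdx s)))
      = PySem.Dict.mk (withIdx (PySem.Set.update s l)) := by
  induction l generalizing s with
  | nil => simp [PySem.Set.update]
  | cons x l ih =>
    have hkeys : (PySem.Dict.mk (withIdx s)).keys = s := by
      simp [PySem.Dict.keys, withIdx, List.map_map, Function.comp_def]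
    have hcont : (PySem.Dict.mk (withIdx s)).contains x = decide (x ∈ s) := by
      rw [PySem.Dict.contains_eq_decide_mem_keys, hkeys]
    by_cases h : x ∈ s
    · have hadd : PySem.Set.add s x = s := by
        simp [PySem.Set.add, PySem.Set.contains, List.contains_eq_mem, h]
      have hstep : (PySem.Dict.mk (withIdx s)).setdefault x ((PySem.Dict.mk (withIdx s)).size : Int)
          = PySem.Dict.mk (withIdx s) :=
        PySem.Dict.setdefault_of_contains _ _ (by rw [hcont]; exact decide_eq_true h)
      rw [List.foldl_cons, hstep, ih s hs]
      simp [PySem.Set.update, hadd]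
    · have hadd : PySem.Set.add s x = s ++ [x] := by
        simp [PySem.Set.add, PySem.Set.contains, List.contains_eq_mem, h]
      have hc : (PySem.Dict.mk (withIdx s)).contains x = false := by
        rw [hcont]; simpa using h
      have hsz : (PySem.Dict.mk (withIdx s)).size = s.length := by
        simp [PySem.Dict.size, withIdx]
      have hstep : (PySem.Dict.mk (withIdx s)).setdefault x ((PySem.Dict.mk (withIdx s)).size : Int)
          = PySem.Dict.mk (withIdx (s ++ [x])) := by
        rw [PySem.Dict.setdefault_of_not_contains _ _ hc]
        apply PySem.Dict.ext
        rw [PySem.Dict.items_insert_of_not_contains _ _ hc, hsz]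
        simp [withIdx, List.zipIdx_append]
      have hnd : (s ++ [x]).Nodup := by
        simp [List.nodup_append, hs]
        intro a ha hax
        exact h (hax ▸ ha)
      rw [List.foldl_cons, hstep, ih (s ++ [x]) hnd]
      simp [PySem.Set.update, hadd]

lemma getD_withIdx (s : List String) (hs : s.Nodup) (i : Nat) (hi : i < s.length) :
    (PySem.Dict.mk (withIdx s)).getD s[i] 0 = (i : Int) := by
  have hkeys : (PySem.Dict.mk (withIdx s)).keys = s := by
    simp [PySem.Dict.keys, withIdx, List.map_map, Function.comp_def]
  have hmem : (s[i], (i : Int)) ∈ (PySem.Dict.mk (withIdx s)).items := by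
    show (s[i], (i : Int)) ∈ withIdx s
    refine List.mem_map.mpr ⟨(s[i], i), ?_, rfl⟩
    have h : s.zipIdx[i]'(by simpa using hi) = (s[i], i) := by simp
    exact h ▸ List.getElem_mem _
  exact PySem.Dict.getD_of_mem_items _ hmem
    (show (PySem.Dict.mk (withIdx s)).keys.Nodup by rw [hkeys]; exact hs) 0

theorem storage_keys_eq (lists : List (List String)) (minimum : Int) :
    storage_keys_with_minimum_frequency_py lists minimum
      = storage_keys_with_minimum_frequency_py_alt lists minimum := by
  have hB : storage_keys_with_minimum_frequency_py_alt lists minimum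
      = (PySem.List.dedup lists.flatten).filter
          (fun key => decide (minimum ≤ (lists.flatten.count key : Int))) := by
    unfold storage_keys_with_minimum_frequency_py_alt
    refine List.filter_congr ?_
    intro k _
    rw [PySem.Dict.getD_foldl_insert_add_one]
    simp
  rw [hB]
  unfold storage_keys_with_minimum_frequency_py
  by_cases hmin : minimum ≤ 1
  · rw [if_pos hmin, union_eq_dedup]
    refine (List.filter_eq_self.mpr ?_).symm
    intro k hk
    have hkm : k ∈ lists.flatten := (PySem.List.mem_dedup _ _).mp hk
    have h1 : 1 ≤ (lists.flatten.count k : Int) := by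
      exact_mod_cast List.one_le_count_iff.mpr hkm
    simp only [decide_eq_true_eq]
    omega
  · rw [if_neg hmin]
    have hDnodup : (PySem.Set.ofList lists.flatten).Nodup :=
      PySem.Set.nodup_ofList lists.flatten
    have hfold : lists.foldl (fun (st : PySem.Dict String Int × PySem.Dict String Int) values =>
          values.foldl (fun st storage_key =>
            (st.1.insert storage_key (st.1.getD storage_key 0 + 1),
             st.2.setdefault storage_key (st.2.size : Int))) st)
          (PySem.Dict.empty, PySem.Dict.empty)
        = (PySem.Dict.counter lists.flatten,
           PySem.Dict.mk (withIdx (PySem.Set.ofList lists.flatten))) := by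
      rw [← List.foldl_flatten,
        PySem.List.foldl_prod_mk
          (f := fun (d : PySem.Dict String Int) k => d.insert k (d.getD k 0 + 1))
          (g := fun (d : PySem.Dict String Int) k => d.setdefault k (d.size : Int))]
      rw [PySem.Dict.foldl_insert_getD_add_one_eq_counter]
      have h0 : (PySem.Dict.empty : PySem.Dict String Int) = PySem.Dict.mk (withIdx []) := rfl
      rw [h0, orderFold_items lists.flatten [] List.nodup_nil, PySem.Set.update_nil_left]
    simp only [hfold]
    have hpw : List.Pairwise
        (fun a b => (PySem.Dict.mk (withIdx (PySem.Set.ofList lists.flatten))).getD a.1 0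
          ≤ (PySem.Dict.mk (withIdx (PySem.Set.ofList lists.flatten))).getD b.1 0)
        ((PySem.Dict.counter lists.flatten).items) := by
      rw [PySem.Dict.items_counter, List.pairwise_map, List.pairwise_iff_getElem]
      intro i j hi hj hij
      simp only
      rw [getD_withIdx _ hDnodup i hi, getD_withIdx _ hDnodup j hj]
      exact_mod_cast Nat.le_of_lt hij
    rw [PySem.List.sorted_eq_self_of_pairwise _ _ hpw, PySem.Dict.items_counter,
      List.filter_map, List.map_map]
    simp [Function.comp_def, List.count]

-- ===== VERDICT (by name: the statement is the Claim_ definition above) =====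
theorem storage_keys_with_minimum_frequency_py_spec : Claim_equal_storage_keys_with_minimum_frequency_py := by
  intro lists minimum _
  unfold Spec_storage_keys_with_minimum_frequency_py
  exact storage_keys_eq lists minimum
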